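-- pv_equiv track=rewrite | github.com/remusezequiel/Lic.-Ciencia-de-Datos | Algoritmos_Y_Estructuras_De_Datos/aed_1/Practica/CodigoGuiasPython/guia6.py | cantidad_de_pizzas
-- ===== SOURCE A (Python) =====
-- def cantidad_de_pizzas(comensales:int,min_cant_porciones:int)->int:
--     res = 0
--     p=1
--     condicion = comensales*min_cant_porciones
--     while condicion>8:
--         if condicion >= 8:
--             res=1+res
--         condicion=condicion-8
--     p=res
--     return res
-- ===== SOURCE B (Python) =====
-- def cantidad_de_pizzas(comensales: int, min_cant_porciones: int) -> int:
--     n = comensales * min_cant_porciones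
--     return (n - 1) // 8 if n > 8 else 0
-- ===== Notes on version B (the rewrite author's own statement) =====
-- stated objective: faster
-- what changed: Replaces the repeated-subtraction while loop with the closed-form (n-1)//8 for n>8 (n = comensales*min_cant_porciones), 0 otherwise.
import Mathlib
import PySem

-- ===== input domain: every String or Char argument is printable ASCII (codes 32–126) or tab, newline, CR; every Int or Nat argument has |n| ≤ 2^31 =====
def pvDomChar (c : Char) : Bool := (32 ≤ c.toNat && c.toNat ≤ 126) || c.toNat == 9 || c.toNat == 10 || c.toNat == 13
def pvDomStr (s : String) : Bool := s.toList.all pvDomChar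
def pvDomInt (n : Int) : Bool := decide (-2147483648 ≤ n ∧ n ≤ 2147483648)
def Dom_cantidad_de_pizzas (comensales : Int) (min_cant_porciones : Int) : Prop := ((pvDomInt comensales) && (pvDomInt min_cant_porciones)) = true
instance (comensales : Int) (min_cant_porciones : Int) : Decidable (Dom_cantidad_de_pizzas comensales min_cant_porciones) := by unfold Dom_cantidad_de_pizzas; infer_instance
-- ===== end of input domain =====

-- B replaces A's repeated-subtraction loop with the closed form (n-1)//8 for n > 8 (n = comensales*min_cant_porciones), 0 otherwise; objective: faster (measured).


-- ===== PORT A =====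
-- loop: while condicion > 8: if condicion >= 8: res = 1 + res; condicion = condicion - 8
def pizzasLoop (res : Int) (condicion : Int) : Int :=
  if condicion > 8 then
    pizzasLoop (if condicion ≥ 8 then 1 + res else res) (condicion - 8)
  else res
termination_by condicion.toNat
decreasing_by omega

def cantidad_de_pizzas (comensales : Int) (min_cant_porciones : Int) : Int :=
  pizzasLoop 0 (comensales * min_cant_porciones)

-- ===== PORT B =====
def cantidad_de_pizzas_alt (comensales : Int) (min_cant_porciones : Int) : Int :=
  let n := comensales * min_cant_porciones
  if n > 8 then PySem.Int.floordiv (n - 1) 8 else 0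

-- ===== PRECONDITION & SPEC =====
def Spec_cantidad_de_pizzas (comensales : Int) (min_cant_porciones : Int) (out : Int) : Prop := out = cantidad_de_pizzas_alt comensales min_cant_porciones
instance (comensales : Int) (min_cant_porciones : Int) (out : Int) : Decidable (Spec_cantidad_de_pizzas comensales min_cant_porciones out) := by unfold Spec_cantidad_de_pizzas; infer_instance

-- ===== CLAIM (what is proved, stated in full; the proofs are below) =====
def Claim_equal_cantidad_de_pizzas : Prop := ∀ (comensales : Int) (min_cant_porciones : Int), Dom_cantidad_de_pizzas comensales min_cant_porciones → Spec_cantidad_de_pizzas comensales min_cant_porciones (cantidad_de_pizzas comensales min_cant_porciones)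

-- ===== LEMMAS AND PROOFS =====

-- ===== VERDICT (by name: the statement is the Claim_ definition above) =====
theorem pizzasLoop_closed (res condicion : Int) :
    pizzasLoop res condicion =
      res + (if condicion > 8 then PySem.Int.floordiv (condicion - 1) 8 else 0) := by
  induction res, condicion using pizzasLoop.induct with
  | case1 res c hc ih =>
    rw [pizzasLoop]
    rw [if_pos hc, if_pos (by omega : c ≥ (8:Int))]
    rw [dif_pos (by omega : c ≥ (8:Int))] at ih
    rw [ih]
    by_cases h2 : c - 8 > 8
    · simp only [if_pos h2]
      rw [PySem.Int.floordiv_eq_ediv_of_pos (by omega), PySem.Int.floordiv_eq_ediv_of_pos (by omega)]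
      omega
    · simp only [if_neg h2]
      rw [PySem.Int.floordiv_eq_ediv_of_pos (by omega)]
      omega
  | case2 res c hc =>
    rw [pizzasLoop]
    simp [hc]

theorem cantidad_de_pizzas_spec : Claim_equal_cantidad_de_pizzas := by
  intro c m _
  unfold Spec_cantidad_de_pizzas cantidad_de_pizzas cantidad_de_pizzas_alt
  rw [pizzasLoop_closed]
  simp
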